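-- pv_equiv track=rewrite | github.com/AVasilkovski/SuperHyperion | scripts/apply_schema.py | compute_transitive_subtypes
-- ===== SOURCE A (Python) =====
-- def compute_transitive_subtypes(parent_of: dict[str, str]) -> dict[str, set[str]]:
--     """Compute transitive subtypes for every entity that has subtypes."""
--     children_of: dict[str, set[str]] = {}
--     for child, parent in parent_of.items():
--         children_of.setdefault(parent, set()).add(child)
--
--     subtypes: dict[str, set[str]] = {}
--
--     def get_all_subtypes(entity: str) -> set[str]:
--         if entity in subtypes:
--             return subtypes[entity]
--         direct_children = children_of.get(entity, set())
--         all_children = set(direct_children)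
--         for child in direct_children:
--             all_children.update(get_all_subtypes(child))
--         subtypes[entity] = all_children
--         return all_children
--
--     for parent in list(children_of.keys()):
--         get_all_subtypes(parent)
--
--     return subtypes
-- ===== SOURCE B (Python) =====
-- def compute_transitive_subtypes(parent_of: dict[str, str]) -> dict[str, set[str]]:
--     """Compute transitive subtypes for every entity that has subtypes.
--
--     Iterative re-implementation: an explicit frame stack (node, pending
--     children, accumulated set) replaces the memoized recursion; a node is
--     finalized once all its children are done, and its set is merged into
--     the frame below it.
--     """
--     children_of: dict[str, set[str]] = {}
--     for child, parent in parent_of.items():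
--         children_of.setdefault(parent, set()).add(child)
--
--     subtypes: dict[str, set[str]] = {}
--
--     for root in children_of:
--         if root in subtypes:
--             continue
--         stack = [[root, list(children_of[root]), set(children_of[root])]]
--         while stack:
--             node, pending, acc = stack[-1]
--             if not pending:
--                 stack.pop()
--                 subtypes[node] = acc
--                 if stack:
--                     stack[-1][2] |= acc
--                 continue
--             c = pending.pop(0)
--             if c in subtypes:
--                 acc |= subtypes[c]
--             else:
--                 kids = children_of.get(c, set())
--                 stack.append([c, list(kids), set(kids)])
--
--     return subtypes
-- ===== Notes on version B (the rewrite author's own statement) =====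
-- stated objective: alternative
-- what changed: The memoized recursive helper get_all_subtypes is replaced by an iterative depth-first traversal with an explicit stack of (node, pending children, accumulated set) frames: a node is finalized once its pending list is empty and its set is then merged into the frame below, so no recursion (and no Python recursion-limit exposure) is needed.
import Mathlib
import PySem

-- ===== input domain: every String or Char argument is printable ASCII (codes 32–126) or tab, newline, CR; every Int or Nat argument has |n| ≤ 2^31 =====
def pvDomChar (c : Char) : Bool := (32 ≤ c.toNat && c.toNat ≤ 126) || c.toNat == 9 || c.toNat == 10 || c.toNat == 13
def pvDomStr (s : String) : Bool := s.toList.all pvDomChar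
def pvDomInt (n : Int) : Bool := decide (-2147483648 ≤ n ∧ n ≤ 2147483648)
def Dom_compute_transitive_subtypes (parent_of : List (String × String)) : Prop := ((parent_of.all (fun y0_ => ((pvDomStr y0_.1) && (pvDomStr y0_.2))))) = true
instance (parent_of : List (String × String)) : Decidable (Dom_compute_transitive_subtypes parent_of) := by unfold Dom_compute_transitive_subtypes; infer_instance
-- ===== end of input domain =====

-- B replaces A's memoized recursion by an explicit frame-stack DFS (alternative
-- decomposition, same cost); return values agree on every acyclic parent_of (Pre_).

-- ===== PORT A =====
-- first loop of BOTH Pythons (identical line for line there): children_of from parent_of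
def ctsChildren (parent_of : List (String × String)) : PySem.Dict String (PySem.Set String) :=
  (PySem.Dict.ofList parent_of).items.foldl
    (fun d cp => d.modify cp.2 PySem.Set.empty (fun s => PySem.Set.add s cp.1))
    PySem.Dict.empty

-- get_all_subtypes: fuel bounds the recursion DEPTH only (parent_of.length + 2 is
-- enough on every acyclic input, where Python's recursion returns; on a cyclic input
-- Python raises RecursionError — excluded by Pre_ — and the port returns a default).
mutual
def ctsGo (ch : PySem.Dict String (PySem.Set String)) :
    Nat → String → PySem.Dict String (PySem.Set String) →
    (PySem.Set String × PySem.Dict String (PySem.Set String))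
  | 0, _, memo => (PySem.Set.empty, memo)
  | f + 1, e, memo =>
    match memo.get? e with
    | some s => (s, memo)
    | none =>
      let direct := ch.getD e PySem.Set.empty
      let r := ctsGoKids ch f direct (PySem.Set.ofList direct) memo
      (r.1, r.2.insert e r.1)
termination_by f _ _ => (f, 0)

def ctsGoKids (ch : PySem.Dict String (PySem.Set String)) :
    Nat → List String → PySem.Set String → PySem.Dict String (PySem.Set String) →
    (PySem.Set String × PySem.Dict String (PySem.Set String))
  | _, [], acc, memo => (acc, memo)
  | f, c :: cs, acc, memo =>
    let r := ctsGo ch f c memo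
    ctsGoKids ch f cs (PySem.Set.update acc r.1) r.2
termination_by f cs _ _ => (f, cs.length + 1)
end

def compute_transitive_subtypes (parent_of : List (String × String)) : List (String × List String) :=
  let ch := ctsChildren parent_of
  (ch.keys.foldl (fun memo p => (ctsGo ch (parent_of.length + 2) p memo).2) PySem.Dict.empty).items

-- ===== PORT B =====
-- weight of a pending call at given depth budget (termination measure helper only)
def ctsWeight (ch : PySem.Dict String (PySem.Set String)) : Nat → String → Nat
  | 0, _ => 0
  | f + 1, c => ((ch.getD c PySem.Set.empty).map (fun c' => 1 + ctsWeight ch f c')).sum + 2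
termination_by f _ => f

def ctsFrameW (ch : PySem.Dict String (PySem.Set String))
    (fr : String × List String × PySem.Set String × Nat) : Nat :=
  (fr.2.1.map (fun c => 1 + ctsWeight ch fr.2.2.2 c)).sum + 1

-- the while-loop of B: stack of frames (node, pending children, accumulated set,
-- depth budget); the budget field plays the role of A's fuel and is never exhausted
-- on acyclic inputs (Python B carries no budget; its loop runs forever only on
-- cyclic inputs, which Pre_ excludes).
def ctsStep (ch : PySem.Dict String (PySem.Set String)) :
    List (String × List String × PySem.Set String × Nat) →
    PySem.Dict String (PySem.Set String) → PySem.Dict String (PySem.Set String)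
  | [], memo => memo
  | [(e, [], acc, _)], memo => memo.insert e acc
  | (e, [], acc, _) :: (p, cs, pacc, pf) :: k, memo =>
    ctsStep ch ((p, cs, PySem.Set.update pacc acc, pf) :: k) (memo.insert e acc)
  | (e, _ :: cs, acc, 0) :: k, memo =>
    ctsStep ch ((e, cs, acc, 0) :: k) memo
  | (e, c :: cs, acc, g + 1) :: k, memo =>
    match memo.get? c with
    | some s => ctsStep ch ((e, cs, PySem.Set.update acc s, g + 1) :: k) memo
    | none =>
      let kids := ch.getD c PySem.Set.empty
      ctsStep ch ((c, kids, PySem.Set.ofList kids, g) :: (e, cs, acc, g + 1) :: k) memo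
termination_by k _ => (k.map (ctsFrameW ch)).sum
decreasing_by
  all_goals simp only [ctsFrameW, List.map_cons, List.sum_cons, Nat.succ_eq_add_one]
  · omega
  · omega
  · omega
  · rw [ctsWeight]; simp; omega

def compute_transitive_subtypes_alt (parent_of : List (String × String)) : List (String × List String) :=
  let ch := ctsChildren parent_of
  (ch.keys.foldl
    (fun memo root =>
      match memo.get? root with
      | some _ => memo
      | none =>
        let kids := ch.getD root PySem.Set.empty
        ctsStep ch [(root, kids, PySem.Set.ofList kids, parent_of.length + 1)] memo)
    PySem.Dict.empty).items

-- ===== PRECONDITION & SPEC =====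
-- n-fold parent lookup (follows the parent chain of the input dict)
def ctsParentIter (d : PySem.Dict String String) : Nat → String → Option String
  | 0, x => some x
  | n + 1, x =>
    match d.get? x with
    | some p => ctsParentIter d n p
    | none => none

-- Pre_ excludes exactly the cyclic parent_of maps, on which Python A raises
-- RecursionError (and Python B's loop does not terminate): no key returns to
-- itself by following parent links.
def Pre_compute_transitive_subtypes (parent_of : List (String × String)) : Prop :=
  ∀ k ∈ (PySem.Dict.ofList parent_of).keys,
    ∀ n < (PySem.Dict.ofList parent_of).size,
      ctsParentIter (PySem.Dict.ofList parent_of) (n + 1) k ≠ some k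
instance (parent_of : List (String × String)) : Decidable (Pre_compute_transitive_subtypes parent_of) := by unfold Pre_compute_transitive_subtypes; infer_instance

def pvWitness_compute_transitive_subtypes : (List (String × String)) :=
  [("b", "a"), ("c", "a"), ("d", "b")]

def Spec_compute_transitive_subtypes (parent_of : List (String × String)) (out : List (String × List String)) : Prop := out = compute_transitive_subtypes_alt parent_of
instance (parent_of : List (String × String)) (out : List (String × List String)) : Decidable (Spec_compute_transitive_subtypes parent_of out) := by unfold Spec_compute_transitive_subtypes; infer_instance

-- ===== CLAIM (what is proved, stated in full; the proofs are below) =====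
def Claim_equal_compute_transitive_subtypes : Prop := ∀ (parent_of : List (String × String)), Dom_compute_transitive_subtypes parent_of → Pre_compute_transitive_subtypes parent_of → Spec_compute_transitive_subtypes parent_of (compute_transitive_subtypes parent_of)

-- ===== LEMMAS AND PROOFS =====

-- the stack machine run on a frame for e computes exactly A's child fold and then
-- pops: ctsStep on (e, cs, acc, f) :: k first replaces (cs, acc, memo) by the result
-- of A's ctsGoKids, then proceeds with the pending-exhausted frame.
theorem ctsStep_bridge (ch : PySem.Dict String (PySem.Set String)) :
    ∀ (f : Nat) (cs : List String) (acc : PySem.Set String) (e : String)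
      (k : List (String × List String × PySem.Set String × Nat))
      (memo : PySem.Dict String (PySem.Set String)),
      ctsStep ch ((e, cs, acc, f) :: k) memo =
        ctsStep ch ((e, [], (ctsGoKids ch f cs acc memo).1, f) :: k)
          (ctsGoKids ch f cs acc memo).2 := by
  intro f
  induction f using Nat.strong_induction_on with
  | _ f IHf =>
  intro cs
  induction cs with
  | nil => intro acc e k memo; rw [ctsGoKids]
  | cons c cs IHcs =>
    intro acc e k memo
    match f with
    | 0 =>
      rw [ctsStep, ctsGoKids, ctsGo]
      exact IHcs acc e k memo
    | g + 1 =>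
      rw [ctsStep, ctsGoKids, ctsGo]
      cases h : memo.get? c with
      | some s => exact IHcs (PySem.Set.update acc s) e k memo
      | none =>
        rw [IHf g (Nat.lt_succ_self g)]
        rw [ctsStep]
        exact IHcs _ e k _

-- one root step of A equals one root step of B
theorem ctsRoot_step (ch : PySem.Dict String (PySem.Set String)) (L : Nat)
    (r : String) (memo : PySem.Dict String (PySem.Set String)) :
    (ctsGo ch (L + 2) r memo).2 =
      match memo.get? r with
      | some _ => memo
      | none =>
        let kids := ch.getD r PySem.Set.empty
        ctsStep ch [(r, kids, PySem.Set.ofList kids, L + 1)] memo := by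
  rw [show L + 2 = (L + 1) + 1 from rfl, ctsGo]
  cases h : memo.get? r with
  | some s => rfl
  | none => rw [ctsStep_bridge, ctsStep]

theorem ctsFold_eq (ch : PySem.Dict String (PySem.Set String)) (L : Nat) :
    ∀ (roots : List String) (memo : PySem.Dict String (PySem.Set String)),
      roots.foldl (fun memo p => (ctsGo ch (L + 2) p memo).2) memo =
        roots.foldl
          (fun memo root =>
            match memo.get? root with
            | some _ => memo
            | none =>
              let kids := ch.getD root PySem.Set.empty
              ctsStep ch [(root, kids, PySem.Set.ofList kids, L + 1)] memo)
          memo := by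
  intro roots memo
  simp only [ctsRoot_step]

-- ===== VERDICT (by name: the statement is the Claim_ definition above) =====
theorem compute_transitive_subtypes_spec : Claim_equal_compute_transitive_subtypes := by
  intro parent_of _ _
  unfold Spec_compute_transitive_subtypes
  unfold compute_transitive_subtypes compute_transitive_subtypes_alt
  have h := ctsFold_eq (ctsChildren parent_of) parent_of.length
    (ctsChildren parent_of).keys PySem.Dict.empty
  exact congrArg PySem.Dict.items h
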